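-- pv_equiv track=rewrite | github.com/lynnyk13/VladBolibruk_MA2018Python | Homework11/index.py | gen_all_strings
-- ===== SOURCE A (Python) =====
-- def gen_all_strings(word):
--     """
--     Generate all strings that can be composed from the letters in word
--     in any order.
--
--     Returns a list of all strings that can be formed from the letters
--     in word.
--
--     This function should be recursive.
--     """
--     if word == '':
--         return ['']
--     else:
--         first = word[0]
--         rest = word[1:]
--         rest_strings = gen_all_strings(rest)
--         all_words = []
--         for string in rest_strings:
--             for leter in range(len(string)+1):
--                 all_words.append(string[0:leter]+first+string[leter:])
--
--         return rest_strings + all_words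
-- ===== SOURCE B (Python) =====
-- def gen_all_strings(word):
--     """Iterative fold instead of recursion: process letters back-to-front,
--     extending the accumulator with every insertion of the letter."""
--     acc = ['']
--     for c in reversed(word):
--         acc = acc + [s[:i] + c + s[i:] for s in acc for i in range(len(s) + 1)]
--     return acc
-- ===== Notes on version B (the rewrite author's own statement) =====
-- stated objective: alternative
-- what changed: Replaces the recursion on the first letter with an iterative fold: acc starts at [''] and each letter of word, processed back-to-front, appends to acc every insertion of that letter into each accumulated string.
import Mathlib
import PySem

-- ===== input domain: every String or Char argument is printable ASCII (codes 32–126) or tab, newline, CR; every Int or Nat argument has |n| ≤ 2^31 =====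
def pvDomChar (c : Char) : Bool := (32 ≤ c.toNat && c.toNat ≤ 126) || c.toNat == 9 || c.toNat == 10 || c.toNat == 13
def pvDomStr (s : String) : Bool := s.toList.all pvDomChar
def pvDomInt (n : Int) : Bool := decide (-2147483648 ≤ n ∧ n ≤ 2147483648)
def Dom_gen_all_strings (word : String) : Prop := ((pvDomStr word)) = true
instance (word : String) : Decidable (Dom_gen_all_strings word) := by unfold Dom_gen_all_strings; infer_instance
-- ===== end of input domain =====

-- B replaces A's recursion on the first letter by an iterative fold over the letters in reverse; return values agree everywhere (alternative decomposition, same cost).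

-- ===== PORT A =====
-- Python A recurses on word[1:]; we recurse on the character list (word[0] = head, word[1:] = tail;
-- s[0:l] and s[l:] with 0 ≤ l ≤ len(s) are take/drop — exact on that range).
def gen_all_strings_core : List Char → List String
  | [] => [""]
  | first :: rest =>
      let rest_strings := gen_all_strings_core rest
      let all_words := rest_strings.flatMap (fun s =>
        (List.range (s.toList.length + 1)).map (fun leter =>
          String.mk (s.toList.take leter ++ [first] ++ s.toList.drop leter)))
      rest_strings ++ all_words

def gen_all_strings (word : String) : List String :=
  gen_all_strings_core word.toList

-- ===== PORT B =====
def gen_all_strings_alt (word : String) : List String :=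
  word.toList.reverse.foldl (fun acc c =>
    acc ++ acc.flatMap (fun s =>
      (List.range (s.toList.length + 1)).map (fun i =>
        String.mk (s.toList.take i ++ [c] ++ s.toList.drop i)))) [""]

-- ===== PRECONDITION & SPEC =====
def Spec_gen_all_strings (word : String) (out : List String) : Prop := out = gen_all_strings_alt word
instance (word : String) (out : List String) : Decidable (Spec_gen_all_strings word out) := by unfold Spec_gen_all_strings; infer_instance

-- ===== CLAIM (what is proved, stated in full; the proofs are below) =====
def Claim_equal_gen_all_strings : Prop := ∀ (word : String), Dom_gen_all_strings word → Spec_gen_all_strings word (gen_all_strings word)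

-- ===== LEMMAS AND PROOFS =====
def pvStep (acc : List String) (c : Char) : List String :=
  acc ++ acc.flatMap (fun s =>
    (List.range (s.toList.length + 1)).map (fun i =>
      String.mk (s.toList.take i ++ [c] ++ s.toList.drop i)))

theorem core_eq_foldl (l : List Char) :
    gen_all_strings_core l = l.reverse.foldl pvStep [""] := by
  induction l with
  | nil => rfl
  | cons c rest ih =>
      simp only [List.reverse_cons, List.foldl_append, List.foldl_cons, List.foldl_nil, ← ih]
      rfl

-- ===== VERDICT (by name: the statement is the Claim_ definition above) =====
theorem gen_all_strings_spec : Claim_equal_gen_all_strings := by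
  intro word _
  unfold Spec_gen_all_strings gen_all_strings gen_all_strings_alt
  rw [core_eq_foldl]
  rfl
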